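-- pv_equiv track=rewrite | github.com/abdullah-an2108536/Python-CMPS151-ProgrammingConcepts | Final Exam/2.py | vowels
-- ===== SOURCE A (Python) =====
-- def vowels(string, list):
--     vowelslist = ["a", "e", "i", "o", "u"]
--     vowelsinstring = 0
--     wordstoreturn = []
--     for chr in string:
--         if chr in vowelslist:
--             vowelsinstring += 1
--     for word in list:
--         vowelsinword = 0
--         for chr in word:
--             if chr in vowelslist:
--                 vowelsinword += 1
--         if vowelsinword == vowelsinstring:
--             wordstoreturn.append(word)
--     return wordstoreturn
-- ===== SOURCE B (Python) =====
-- # B: group words into a dict keyed by vowel count in one pass, then return the bucket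
-- # matching the string's vowel count (returns the same list, in the same order, as A).
-- def vowels(string, list):
--     vowel_set = set("aeiou")
--
--     def vc(s):
--         return sum(1 for c in s if c in vowel_set)
--
--     groups = {}
--     for word in list:
--         groups.setdefault(vc(word), []).append(word)
--     return groups.get(vc(string), [])
-- ===== Notes on version B (the rewrite author's own statement) =====
-- stated objective: alternative
-- what changed: B builds a dict grouping words by vowel count in one pass (counting via a set-membership generator sum) and returns the bucket for the string's vowel count, instead of A's per-word compare-and-append scan against a list of vowels.
import Mathlib
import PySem

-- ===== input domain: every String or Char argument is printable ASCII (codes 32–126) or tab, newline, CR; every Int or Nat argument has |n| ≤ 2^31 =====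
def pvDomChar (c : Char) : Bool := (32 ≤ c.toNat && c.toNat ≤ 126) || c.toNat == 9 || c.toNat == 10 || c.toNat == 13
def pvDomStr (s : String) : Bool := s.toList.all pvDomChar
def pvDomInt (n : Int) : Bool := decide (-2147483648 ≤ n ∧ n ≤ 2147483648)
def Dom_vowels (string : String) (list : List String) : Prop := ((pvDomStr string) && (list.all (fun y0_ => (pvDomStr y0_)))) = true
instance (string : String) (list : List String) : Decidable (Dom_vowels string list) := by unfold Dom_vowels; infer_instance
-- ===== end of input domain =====

-- B groups the words into a dict keyed by vowel count in one pass and returns the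
-- bucket for the string's vowel count; same output as A (objective: alternative).

-- ===== PORT A =====
def vowels (string : String) (list : List String) : List String :=
  let vowelslist : List Char := ['a', 'e', 'i', 'o', 'u']
  let vowelsinstring : Int :=
    string.toList.foldl (fun n c => if c ∈ vowelslist then n + 1 else n) 0
  list.foldl (fun wordstoreturn word =>
    let vowelsinword : Int :=
      word.toList.foldl (fun n c => if c ∈ vowelslist then n + 1 else n) 0
    if vowelsinword = vowelsinstring then wordstoreturn ++ [word] else wordstoreturn) []

-- ===== PORT B =====
-- vc(s) = sum(1 for c in s if c in vowel_set), vowel_set = set("aeiou")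
def vowelsAltVc (s : String) : Int :=
  (s.toList.countP (fun c => c ∈ PySem.Set.ofList "aeiou".toList) : Int)

def vowels_alt (string : String) (list : List String) : List String :=
  let groups : PySem.Dict Int (List String) :=
    list.foldl (fun d word => d.modify (vowelsAltVc word) [] (· ++ [word])) PySem.Dict.empty
  groups.getD (vowelsAltVc string) []

-- ===== PRECONDITION & SPEC =====
def Spec_vowels (string : String) (list : List String) (out : List String) : Prop := out = vowels_alt string list
instance (string : String) (list : List String) (out : List String) : Decidable (Spec_vowels string list out) := by unfold Spec_vowels; infer_instance

-- ===== CLAIM (what is proved, stated in full; the proofs are below) =====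
def Claim_equal_vowels : Prop := ∀ (string : String) (list : List String), Dom_vowels string list → Spec_vowels string list (vowels string list)

-- ===== LEMMAS AND PROOFS =====

-- A's hand-rolled vowel counter equals B's countP-based counter.
theorem vowels_count_eq (s : String) :
    s.toList.foldl (fun n c => if c ∈ (['a', 'e', 'i', 'o', 'u'] : List Char) then n + 1 else n) (0 : Int)
      = vowelsAltVc s := by
  unfold vowelsAltVc
  rw [PySem.List.foldl_ite_add_one, zero_add,
    show PySem.Set.ofList "aeiou".toList = ['a', 'e', 'i', 'o', 'u'] from by decide]

-- B's grouping fold, looked up at key t, is exactly the filter of the list by vowel count t.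
theorem vowels_group_getD (list : List String) (t : Int) :
    (list.foldl (fun d word => d.modify (vowelsAltVc word) [] (· ++ [word])) PySem.Dict.empty).getD t []
      = list.filter (fun word => vowelsAltVc word == t) := by
  rw [show list.foldl (fun d word => d.modify (vowelsAltVc word) [] (· ++ [word])) PySem.Dict.empty
      = (list.map (fun word => (vowelsAltVc word, word))).foldl
          (fun d p => d.modify p.1 [] (· ++ [p.2])) PySem.Dict.empty from by rw [List.foldl_map],
    PySem.Dict.getD_foldl_modify_append]
  simp [List.filter_map, Function.comp_def]

-- ===== VERDICT (by name: the statement is the Claim_ definition above) =====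
theorem vowels_spec : Claim_equal_vowels := by
  intro string list _
  unfold Spec_vowels vowels vowels_alt
  simp only [vowels_count_eq, vowels_group_getD]
  rw [PySem.List.foldl_append_ite_eq_filter]
  simp [BEq.beq]
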